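-- pv_equiv track=rewrite | github.com/hsn8086/exam | codeforces/2103/C_Median_Splits copy.py | skip1
-- ===== SOURCE A (Python) =====
-- def skip1(arr, k):
--         N = len(arr)
--         sm = [int(x <= k) for x in arr]
--         pr = [0] * (N + 1)
--         PP = [0] * (N + 1)
--         for i in range(1, N + 1):
--             pr[i] = pr[i - 1] + sm[i - 1]
--             PP[i] = 2 * pr[i] - i
--
--         h2 = [False] * (N + 2)
--         for i in range(1, N + 1):
--             m = N - i + 1
--             cnt = pr[N] - pr[i - 1]
--             val = 2 * cnt - m
--             if val >= m % 2:
--                 h2[i] = True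
--
--         INF = float('inf')
--         mn = [INF, INF]
--
--         for r in range(2, N):
--             t = r - 1
--             mn[t % 2] = min(mn[t % 2], PP[t])
--             prr = PP[r]
--             ok = False
--             if mn[r % 2] <= prr:
--                 ok = True
--             if mn[1 - r % 2] <= prr - 1:
--                 ok = True
--             if ok and h2[r + 1]:
--                 return True
--         return False
-- ===== SOURCE B (Python) =====
-- def skip1(arr, k):
--     # Single pass, O(1) extra space: since PP[t] = 2*pr[t] - t has the parity of t,
--     # A's two parity-split minima collapse into one running minimum (PP[t] <= PP[r]-1
--     # for opposite parity t is the same as PP[t] <= PP[r], as equality is impossible).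
--     N = len(arr)
--     if N < 3:
--         return False
--     total = sum(x <= k for x in arr)
--     best = None                  # min of 2*pr[t] - t over t = 1 .. r-1
--     p = int(arr[0] <= k)         # p == pr[r-1] at the top of each iteration
--     for r in range(2, N):
--         v = 2 * p - (r - 1)
--         if best is None or v < best:
--             best = v
--         p += arr[r - 1] <= k     # now p == pr[r]
--         m = N - r
--         if best <= 2 * p - r and 2 * (total - p) - m >= m % 2:
--             return True
--     return False
-- ===== Notes on version B (the rewrite author's own statement) =====
-- stated objective: faster
-- what changed: Since PP[t]=2*pr[t]-t has the parity of t, A's two parity-separated running minima (and the <=prr vs <=prr-1 case split) collapse into one running minimum compared with PP[r]; B is a single pass with two integer accumulators, no sm/pr/PP/h2 arrays.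
import Mathlib
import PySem

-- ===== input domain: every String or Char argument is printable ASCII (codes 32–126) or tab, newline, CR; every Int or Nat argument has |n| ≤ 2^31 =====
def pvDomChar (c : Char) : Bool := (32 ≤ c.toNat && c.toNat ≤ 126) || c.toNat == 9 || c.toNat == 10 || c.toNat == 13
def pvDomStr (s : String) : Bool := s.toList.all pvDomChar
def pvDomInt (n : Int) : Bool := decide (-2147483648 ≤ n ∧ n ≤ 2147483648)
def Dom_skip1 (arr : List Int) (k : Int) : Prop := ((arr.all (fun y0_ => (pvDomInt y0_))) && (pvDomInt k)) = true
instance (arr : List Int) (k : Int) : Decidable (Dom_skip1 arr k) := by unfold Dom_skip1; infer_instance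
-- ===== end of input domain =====

-- B replaces A's parity-split running minima (and the sm/pr/PP/h2 arrays) by one running
-- minimum and two integer accumulators in a single pass: O(1) extra space, measured faster.

-- ===== PORT A =====
-- A-side helpers. A's arrays pr/PP are written once left-to-right and read only at already
-- written indices, so each entry is the recursive function prA/PPA of its index; likewise the
-- h2 array entry read at index r+1 (1 ≤ r+1 ≤ N) is h2A. float('inf') is modelled by
-- Option Int (none): inf is greater than every int, min(inf,x)=x and inf<=x is False — exact here.
def smOf (arr : List Int) (k : Int) : List Int :=
  arr.map (fun x => if x ≤ k then (1 : Int) else 0)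

def prA (sm : List Int) : Nat → Int
  | 0 => 0
  | i + 1 => prA sm i + sm.getD i 0

def PPA (sm : List Int) (i : Nat) : Int := 2 * prA sm i - (i : Int)

def h2A (sm : List Int) (N i : Nat) : Bool :=
  decide (2 * (prA sm N - prA sm (i - 1)) - ((N : Int) - (i : Int) + 1) ≥ ((N : Int) - (i : Int) + 1) % 2)

-- Python min(mn, v) with mn possibly inf
def pvOmin (o : Option Int) (v : Int) : Option Int :=
  some (match o with | none => v | some w => min w v)

-- Python mn <= x with mn possibly inf
def pvLe (o : Option Int) (x : Int) : Bool :=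
  match o with | none => false | some w => decide (w ≤ x)

def loopA (sm : List Int) (N : Nat) (r : Nat) (mn0 mn1 : Option Int) : Bool :=
  if r < N then
    let t := r - 1
    let mn0' := if t % 2 = 0 then pvOmin mn0 (PPA sm t) else mn0
    let mn1' := if t % 2 = 0 then mn1 else pvOmin mn1 (PPA sm t)
    let prr := PPA sm r
    let ok := pvLe (if r % 2 = 0 then mn0' else mn1') prr
              || pvLe (if r % 2 = 0 then mn1' else mn0') (prr - 1)
    if ok && h2A sm N (r + 1) then true
    else loopA sm N (r + 1) mn0' mn1'
  else false
termination_by N - r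

def skip1 (arr : List Int) (k : Int) : Bool :=
  loopA (smOf arr k) arr.length 2 none none

-- ===== PORT B =====
def totB (arr : List Int) (k : Int) : Int :=
  arr.foldl (fun a x => a + (if x ≤ k then (1 : Int) else 0)) 0

def loopB (arr : List Int) (k : Int) (N : Nat) (r : Nat) (best : Option Int) (p : Int) : Bool :=
  if r < N then
    let v : Int := 2 * p - ((r : Int) - 1)
    let best' : Int := match best with | none => v | some b => if v < b then v else b
    let p' : Int := p + (if arr.getD (r - 1) 0 ≤ k then 1 else 0)
    let m : Int := (N : Int) - (r : Int)
    if decide (best' ≤ 2 * p' - (r : Int)) && decide (2 * (totB arr k - p') - m ≥ m % 2) then true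
    else loopB arr k N (r + 1) (some best') p'
  else false
termination_by N - r

def skip1_alt (arr : List Int) (k : Int) : Bool :=
  if arr.length < 3 then false
  else loopB arr k arr.length 2 none (if arr.getD 0 0 ≤ k then 1 else 0)

-- ===== PRECONDITION & SPEC =====
def Spec_skip1 (arr : List Int) (k : Int) (out : Bool) : Prop := out = skip1_alt arr k
instance (arr : List Int) (k : Int) (out : Bool) : Decidable (Spec_skip1 arr k out) := by unfold Spec_skip1; infer_instance

-- ===== CLAIM (what is proved, stated in full; the proofs are below) =====
def Claim_equal_skip1 : Prop := ∀ (arr : List Int) (k : Int), Dom_skip1 arr k → Spec_skip1 arr k (skip1 arr k)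

-- ===== LEMMAS AND PROOFS =====

def pvAccMin (L : List Int) : Option Int := L.foldl pvOmin none

lemma pvLe_omin (o : Option Int) (v x : Int) :
    pvLe (pvOmin o v) x = (pvLe o x || decide (v ≤ x)) := by
  cases o <;> (rw [Bool.eq_iff_iff]; simp [pvLe, pvOmin])

lemma pvLe_foldl (L : List Int) (o : Option Int) (x : Int) :
    pvLe (L.foldl pvOmin o) x = (pvLe o x || L.any (fun v => decide (v ≤ x))) := by
  induction L generalizing o with
  | nil => simp
  | cons v L ih =>
      simp [List.foldl_cons, ih, pvLe_omin, Bool.or_assoc]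

lemma pvLe_accMin (L : List Int) (x : Int) :
    pvLe (pvAccMin L) x = L.any (fun v => decide (v ≤ x)) := by
  show pvLe (L.foldl pvOmin none) x = _
  rw [pvLe_foldl]
  simp [pvLe]

lemma PPA_parity (sm : List Int) (t : Nat) : PPA sm t % 2 = (t : Int) % 2 := by
  unfold PPA; omega

lemma ok_equiv (sm : List Int) (r : Nat) (R : List Nat) (q : Nat → Bool)
    (hq : ∀ t, q t = (t % 2 == r % 2)) :
    (pvLe (pvAccMin ((R.filter q).map (PPA sm))) (PPA sm r)
      || pvLe (pvAccMin ((R.filter (fun t => !q t)).map (PPA sm))) (PPA sm r - 1))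
    = pvLe (pvAccMin (R.map (PPA sm))) (PPA sm r) := by
  simp only [pvLe_accMin]
  rw [Bool.eq_iff_iff]
  simp only [Bool.or_eq_true, List.any_eq_true, List.mem_map, List.mem_filter,
    decide_eq_true_eq]
  constructor
  · rintro (⟨v, ⟨t, ⟨ht, hqt⟩, rfl⟩, hle⟩ | ⟨v, ⟨t, ⟨ht, hqt⟩, rfl⟩, hle⟩)
    · exact ⟨PPA sm t, ⟨t, ht, rfl⟩, hle⟩
    · exact ⟨PPA sm t, ⟨t, ht, rfl⟩, by omega⟩
  · rintro ⟨v, ⟨t, ht, rfl⟩, hle⟩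
    by_cases hqt : q t = true
    · exact Or.inl ⟨PPA sm t, ⟨t, ⟨ht, hqt⟩, rfl⟩, hle⟩
    · refine Or.inr ⟨PPA sm t, ⟨t, ⟨ht, by simp [hqt]⟩, rfl⟩, ?_⟩
      have h1 := PPA_parity sm t
      have h2 := PPA_parity sm r
      have hne : t % 2 ≠ r % 2 := by
        intro h; rw [hq t, h] at hqt; simp at hqt
      omega

lemma accMin_append (L : List Int) (v : Int) :
    pvAccMin (L ++ [v]) = pvOmin (pvAccMin L) v := by
  simp [pvAccMin, List.foldl_append]

lemma some_best' (best : Option Int) (v : Int) :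
    (some (match best with | none => v | some b => if v < b then v else b) : Option Int)
      = pvOmin best v := by
  cases best with
  | none => rfl
  | some b =>
      simp only [pvOmin, Option.some.injEq]
      rcases lt_or_ge v b with h | h
      · rw [if_pos h]; omega
      · rw [if_neg (not_lt.mpr h)]; omega

lemma sm_getD (arr : List Int) (k : Int) (i : Nat) (h : i < arr.length) :
    (smOf arr k).getD i 0 = (if arr.getD i 0 ≤ k then (1 : Int) else 0) := by
  simp [smOf, List.getD_eq_getElem?_getD, List.getElem?_map, List.getElem?_eq_getElem h]

lemma totB_eq_aux (arr : List Int) (k : Int) (c : Int) :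
    arr.foldl (fun a x => a + (if x ≤ k then (1 : Int) else 0)) c
      = c + prA (smOf arr k) arr.length := by
  induction arr generalizing c with
  | nil => simp [prA]
  | cons x xs ih =>
      have hcons : ∀ i, prA (smOf (x :: xs) k) (i + 1)
          = (if x ≤ k then (1 : Int) else 0) + prA (smOf xs k) i := by
        intro i
        induction i with
        | zero => simp [prA, smOf]
        | succ j ihj =>
            show prA (smOf (x :: xs) k) (j + 1) + (smOf (x :: xs) k).getD (j + 1) 0 = _
            rw [ihj]
            simp [prA, smOf, List.getD]
            ring
      simp only [List.foldl_cons, List.length_cons, ih, hcons xs.length]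
      ring

lemma totB_eq (arr : List Int) (k : Int) :
    totB arr k = prA (smOf arr k) arr.length := by
  simpa using totB_eq_aux arr k 0

lemma filter_mod_one (L : List Nat) :
    L.filter (fun t => t % 2 == 1) = L.filter (fun t => !(t % 2 == 0)) := by
  apply List.filter_congr
  intro t _
  rcases Nat.mod_two_eq_zero_or_one t with h | h <;> simp [h]

lemma filter_mod_zero (L : List Nat) :
    L.filter (fun t => t % 2 == 0) = L.filter (fun t => !(t % 2 == 1)) := by
  apply List.filter_congr
  intro t _
  rcases Nat.mod_two_eq_zero_or_one t with h | h <;> simp [h]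

-- the main loop correspondence: at entry of iteration r, A's parity minima cover t = 1..r-2
-- and B's best / p are the overall minimum over t = 1..r-2 and pr[r-1]
lemma loop_eq (arr : List Int) (k : Int) (r : Nat) (hr : 2 ≤ r) :
    loopA (smOf arr k) arr.length r
      (pvAccMin (((List.range' 1 (r - 2)).filter (fun t => t % 2 == 0)).map (PPA (smOf arr k))))
      (pvAccMin (((List.range' 1 (r - 2)).filter (fun t => t % 2 == 1)).map (PPA (smOf arr k))))
    = loopB arr k arr.length r
      (pvAccMin ((List.range' 1 (r - 2)).map (PPA (smOf arr k))))
      (prA (smOf arr k) (r - 1)) := by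
  by_cases hlt : r < arr.length
  · unfold loopA loopB
    rw [if_pos hlt, if_pos hlt]
    simp only []
    have hconc : List.range' 1 (r - 1) = List.range' 1 (r - 2) ++ [r - 1] := by
      rw [show r - 1 = (r - 2) + 1 from by omega, List.range'_1_concat]
      simp [Nat.add_comm]
    have hv : 2 * prA (smOf arr k) (r - 1) - ((r : Int) - 1) = PPA (smOf arr k) (r - 1) := by
      unfold PPA; omega
    have hq' : prA (smOf arr k) (r - 1) + (if arr.getD (r - 1) 0 ≤ k then (1 : Int) else 0)
        = prA (smOf arr k) r := by
      rw [← sm_getD arr k (r - 1) (by omega)]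
      conv_rhs => rw [show r = (r - 1) + 1 from by omega]
      simp [prA]
    have hh2 : h2A (smOf arr k) arr.length (r + 1)
        = decide (2 * (totB arr k - prA (smOf arr k) r) - ((arr.length : Int) - (r : Int))
            ≥ ((arr.length : Int) - (r : Int)) % 2) := by
      have hm : (arr.length : Int) - ((r + 1 : Nat) : Int) + 1 = (arr.length : Int) - (r : Int) := by
        push_cast; ring
      unfold h2A
      rw [Nat.add_sub_cancel, totB_eq, hm]
    have ih := loop_eq arr k (r + 1) (by omega)
    simp only [show r + 1 - 2 = r - 1 from by omega, show r + 1 - 1 = r from by omega] at ih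
    rcases Nat.mod_two_eq_zero_or_one r with hr2 | hr2
    · have h1 : (r - 1) % 2 = 1 := by omega
      simp only [hr2, h1, show ((1:Nat) = 0) = False from by simp, if_true, if_false]
      set w : Int := (match pvAccMin (List.map (PPA (smOf arr k)) (List.range' 1 (r - 2))) with
        | none => 2 * prA (smOf arr k) (r - 1) - ((r : Int) - 1)
        | some b => if 2 * prA (smOf arr k) (r - 1) - ((r : Int) - 1) < b then
            2 * prA (smOf arr k) (r - 1) - ((r : Int) - 1) else b) with hw
      have hsw : (some w : Option Int)
          = pvAccMin (List.map (PPA (smOf arr k)) (List.range' 1 (r - 1))) := by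
        rw [hw, some_best', hv, hconc]
        simp [accMin_append]
      have hEkeep : pvAccMin (List.map (PPA (smOf arr k))
            (List.filter (fun t => t % 2 == 0) (List.range' 1 (r - 2))))
          = pvAccMin (List.map (PPA (smOf arr k))
            (List.filter (fun t => t % 2 == 0) (List.range' 1 (r - 1)))) := by
        rw [hconc]; simp [List.filter_append, h1]
      have hOupd : pvOmin (pvAccMin (List.map (PPA (smOf arr k))
            (List.filter (fun t => t % 2 == 1) (List.range' 1 (r - 2))))) (PPA (smOf arr k) (r - 1))
          = pvAccMin (List.map (PPA (smOf arr k))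
            (List.filter (fun t => t % 2 == 1) (List.range' 1 (r - 1)))) := by
        rw [hconc]; simp [List.filter_append, h1, accMin_append]
      rw [hEkeep, hOupd, hq']
      have hdec : decide (w ≤ 2 * prA (smOf arr k) r - (r : Int))
          = pvLe (pvAccMin (List.map (PPA (smOf arr k)) (List.range' 1 (r - 1))))
              (PPA (smOf arr k) r) := by
        rw [← hsw]; rfl
      rw [hdec, hh2]
      have hok := ok_equiv (smOf arr k) r (List.range' 1 (r - 1)) (fun t => t % 2 == 0)
        (by intro t; rw [hr2])
      simp only [] at hok
      rw [← filter_mod_one] at hok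
      rw [hok]
      split_ifs
      · rfl
      · rw [hsw]; exact ih
    · have h1 : (r - 1) % 2 = 0 := by omega
      simp only [hr2, h1, show ((1:Nat) = 0) = False from by simp, if_true, if_false]
      set w : Int := (match pvAccMin (List.map (PPA (smOf arr k)) (List.range' 1 (r - 2))) with
        | none => 2 * prA (smOf arr k) (r - 1) - ((r : Int) - 1)
        | some b => if 2 * prA (smOf arr k) (r - 1) - ((r : Int) - 1) < b then
            2 * prA (smOf arr k) (r - 1) - ((r : Int) - 1) else b) with hw
      have hsw : (some w : Option Int)
          = pvAccMin (List.map (PPA (smOf arr k)) (List.range' 1 (r - 1))) := by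
        rw [hw, some_best', hv, hconc]
        simp [accMin_append]
      have hOkeep : pvAccMin (List.map (PPA (smOf arr k))
            (List.filter (fun t => t % 2 == 1) (List.range' 1 (r - 2))))
          = pvAccMin (List.map (PPA (smOf arr k))
            (List.filter (fun t => t % 2 == 1) (List.range' 1 (r - 1)))) := by
        rw [hconc]; simp [List.filter_append, h1]
      have hEupd : pvOmin (pvAccMin (List.map (PPA (smOf arr k))
            (List.filter (fun t => t % 2 == 0) (List.range' 1 (r - 2))))) (PPA (smOf arr k) (r - 1))
          = pvAccMin (List.map (PPA (smOf arr k))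
            (List.filter (fun t => t % 2 == 0) (List.range' 1 (r - 1)))) := by
        rw [hconc]; simp [List.filter_append, h1, accMin_append]
      rw [hOkeep, hEupd, hq']
      have hdec : decide (w ≤ 2 * prA (smOf arr k) r - (r : Int))
          = pvLe (pvAccMin (List.map (PPA (smOf arr k)) (List.range' 1 (r - 1))))
              (PPA (smOf arr k) r) := by
        rw [← hsw]; rfl
      rw [hdec, hh2]
      have hok := ok_equiv (smOf arr k) r (List.range' 1 (r - 1)) (fun t => t % 2 == 1)
        (by intro t; rw [hr2])
      simp only [] at hok
      rw [← filter_mod_zero] at hok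
      rw [hok]
      split_ifs
      · rfl
      · rw [hsw]; exact ih
  · unfold loopA loopB
    rw [if_neg hlt, if_neg hlt]
termination_by arr.length - r

-- ===== VERDICT (by name: the statement is the Claim_ definition above) =====
theorem skip1_spec : Claim_equal_skip1 := by
  intro arr k _
  unfold Spec_skip1 skip1 skip1_alt
  by_cases h3 : arr.length < 3
  · rw [if_pos h3]
    unfold loopA
    rw [if_neg (by omega)]
  · rw [if_neg h3]
    have hp : prA (smOf arr k) 1 = (if arr.getD 0 0 ≤ k then (1 : Int) else 0) := by
      show prA (smOf arr k) 0 + (smOf arr k).getD 0 0 = _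
      rw [sm_getD arr k 0 (by omega)]
      simp [prA]
    have h := loop_eq arr k 2 le_rfl
    rw [hp] at h
    exact h
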